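-- pv_equiv track=rewrite | github.com/rentsdue/project-euler-solutions | solutions.py | diffBetweenSquares
-- ===== SOURCE A (Python) =====
-- def diffBetweenSquares(n):
--     sumOfSquares = 0
--     for i in range(1, n + 1):
--         sumOfSquares += i ** 2
--
--     squareOfTotal = 0
--     for i in range(1, n + 1):
--         squareOfTotal += i
--     squareOfTotal = squareOfTotal ** 2
--
--     return squareOfTotal - sumOfSquares
-- ===== SOURCE B (Python) =====
-- def diffBetweenSquares(n):
--     m = n if n > 0 else 0
--     s = m * (m + 1) // 2
--     sq = m * (m + 1) * (2 * m + 1) // 6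
--     return s * s - sq
-- ===== Notes on version B (the rewrite author's own statement) =====
-- stated objective: faster
-- what changed: Replaces the two linear accumulation loops with closed-form Gauss formulas for the sum and the sum of squares, clamped at zero for non-positive n to match the empty range.
import Mathlib
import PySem

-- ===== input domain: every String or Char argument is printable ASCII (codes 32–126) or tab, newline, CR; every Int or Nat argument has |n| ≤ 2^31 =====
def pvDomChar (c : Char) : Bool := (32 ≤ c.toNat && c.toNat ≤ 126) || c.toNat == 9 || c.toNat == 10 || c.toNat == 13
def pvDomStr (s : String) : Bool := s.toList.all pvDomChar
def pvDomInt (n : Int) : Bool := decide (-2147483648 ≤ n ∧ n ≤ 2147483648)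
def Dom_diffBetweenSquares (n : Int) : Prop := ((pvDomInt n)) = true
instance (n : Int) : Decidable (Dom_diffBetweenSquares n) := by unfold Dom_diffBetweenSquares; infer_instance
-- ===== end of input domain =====

-- B replaces A's two accumulation loops with the closed-form Gauss formulas (O(1) instead of O(n)).

-- ===== PORT A =====
def diffBetweenSquares (n : Int) : Int :=
  let sumOfSquares := (PySem.List.pyRange 1 (n + 1) 1).foldl (fun acc i => acc + i ^ 2) 0
  let squareOfTotal := (PySem.List.pyRange 1 (n + 1) 1).foldl (fun acc i => acc + i) 0
  let squareOfTotal := squareOfTotal ^ 2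
  squareOfTotal - sumOfSquares

-- ===== PORT B =====
def diffBetweenSquares_alt (n : Int) : Int :=
  let m := if n > 0 then n else 0
  let s := PySem.Int.floordiv (m * (m + 1)) 2
  let sq := PySem.Int.floordiv (m * (m + 1) * (2 * m + 1)) 6
  s * s - sq

-- ===== PRECONDITION & SPEC =====
def Spec_diffBetweenSquares (n : Int) (out : Int) : Prop := out = diffBetweenSquares_alt n
instance (n : Int) (out : Int) : Decidable (Spec_diffBetweenSquares n out) := by unfold Spec_diffBetweenSquares; infer_instance

-- ===== CLAIM (what is proved, stated in full; the proofs are below) =====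
def Claim_equal_diffBetweenSquares : Prop := ∀ (n : Int), Dom_diffBetweenSquares n → Spec_diffBetweenSquares n (diffBetweenSquares n)

-- ===== LEMMAS AND PROOFS =====

-- Gauss sums of the loop folds, stated multiplicatively (no division), by induction on the range length.
theorem pv_fold_sum (k : Nat) :
    2 * ((PySem.List.pyRange 1 ((k : Int) + 1) 1).foldl (fun acc i => acc + i) 0) = (k : Int) * (k + 1) := by
  induction k with
  | zero => decide
  | succ m ih =>
    have h : PySem.List.pyRange 1 (((m + 1 : Nat) : Int) + 1) 1
        = PySem.List.pyRange 1 ((m : Int) + 1) 1 ++ [(m : Int) + 1] := by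
      push_cast
      exact PySem.List.pyRange_one_succ_right (by omega)
    rw [h, List.foldl_append]
    simp only [List.foldl_cons, List.foldl_nil]
    rw [PySem.List.foldl_add (g := fun i => i)] at ih ⊢
    push_cast
    push_cast at ih
    nlinarith [ih]

theorem pv_fold_sumsq (k : Nat) :
    6 * ((PySem.List.pyRange 1 ((k : Int) + 1) 1).foldl (fun acc i => acc + i ^ 2) 0) = (k : Int) * (k + 1) * (2 * k + 1) := by
  induction k with
  | zero => decide
  | succ m ih =>
    have h : PySem.List.pyRange 1 (((m + 1 : Nat) : Int) + 1) 1
        = PySem.List.pyRange 1 ((m : Int) + 1) 1 ++ [(m : Int) + 1] := by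
      push_cast
      exact PySem.List.pyRange_one_succ_right (by omega)
    rw [h, List.foldl_append]
    simp only [List.foldl_cons, List.foldl_nil]
    rw [PySem.List.foldl_add (g := fun i => i ^ 2)] at ih ⊢
    push_cast
    push_cast at ih
    nlinarith [ih]

theorem pv_floordiv_exact (x q b : Int) (hb : 0 < b) (h : b * q = x) :
    PySem.Int.floordiv x b = q := by
  rw [PySem.Int.floordiv_eq_ediv_of_pos hb, ← h, Int.mul_ediv_cancel_left _ (by omega)]

-- ===== VERDICT (by name: the statement is the Claim_ definition above) =====
theorem diffBetweenSquares_spec : Claim_equal_diffBetweenSquares := by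
  unfold Claim_equal_diffBetweenSquares
  intro n _
  unfold Spec_diffBetweenSquares diffBetweenSquares diffBetweenSquares_alt
  by_cases hn : n > 0
  · obtain ⟨k, hk⟩ : ∃ k : Nat, n = (k : Int) := ⟨n.toNat, by omega⟩
    subst hk
    simp only [hn, if_pos]
    have h1 := pv_fold_sum k
    have h2 := pv_fold_sumsq k
    rw [pv_floordiv_exact _ _ 2 (by omega) h1, pv_floordiv_exact _ _ 6 (by omega) h2]
    ring
  · have he : PySem.List.pyRange 1 (n + 1) 1 = [] := PySem.List.pyRange_one_eq_nil (by omega)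
    simp [he, hn, PySem.Int.floordiv]
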